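-- pv_equiv track=rewrite | github.com/pypi-data/pypi-mirror-244 | packages/ChromoPhyloGen/ChromoPhyloGen-1.0.tar.gz/ChromoPhyloGen-1.0/ChromoPhyloGen/distance.py | distcalc
-- ===== SOURCE A (Python) =====
-- import copy
--
-- def distcalc(node1, node2):
--     assert len(node1) == len(node2)
--     if len(node1) == 1:
--         return abs(node1[0] - node2[0])
--     else:
--         d = 0
--         newlist = copy.deepcopy(node1)
--         for i in range(0, len(node2)):
--             newlist[i] -= node2[i]
--         while newlist:
--             if newlist[0] == 0:
--                 newlist.pop(0)
--             elif newlist[0] > 0: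
--                 k = 0
--                 for i in range(0, len(newlist)):
--                     if newlist[i] > 0:
--                         k = i
--                     else:
--                         break
--                 for i in range(0, k + 1):
--                     newlist[i] -= 1
--                 d += 1
--             elif newlist[0] < 0:
--                 k = 0
--                 for i in range(0, len(newlist)):
--                     if newlist[i] < 0:
--                         k = i
--                     else:
--                         break
--                 for i in range(0, k + 1):
--                     newlist[i] += 1
--                 d += 1
--         return abs(d)
-- ===== SOURCE B (Python) =====
-- def distcalc(node1, node2):
--     assert len(node1) == len(node2)
--     d = 0
--     prev = 0
--     for x, y in zip(node1, node2):
--         a = x - y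
--         d += max(0, max(a, 0) - max(prev, 0)) + max(0, max(-a, 0) - max(-prev, 0))
--         prev = a
--     return d
-- ===== Notes on version B (the rewrite author's own statement) =====
-- stated objective: faster
-- what changed: Replaced A's repeated prefix-decrement simulation of the difference array (one unit step per operation) by a single pass that sums, per position, the extra positive and negative amplitude over the previous element.
import Mathlib
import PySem

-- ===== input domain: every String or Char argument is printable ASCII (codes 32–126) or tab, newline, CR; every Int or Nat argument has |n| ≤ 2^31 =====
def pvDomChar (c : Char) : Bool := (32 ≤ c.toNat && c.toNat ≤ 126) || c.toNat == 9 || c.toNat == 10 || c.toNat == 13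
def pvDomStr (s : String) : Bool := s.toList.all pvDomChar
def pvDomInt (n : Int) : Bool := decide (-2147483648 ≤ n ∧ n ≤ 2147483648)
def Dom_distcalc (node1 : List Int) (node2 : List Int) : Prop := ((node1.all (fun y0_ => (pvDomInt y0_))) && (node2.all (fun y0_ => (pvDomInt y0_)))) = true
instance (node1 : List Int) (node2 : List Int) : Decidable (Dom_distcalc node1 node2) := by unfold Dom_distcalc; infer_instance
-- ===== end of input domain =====

-- B replaces A's unit-step prefix-decrement simulation of the difference array by a
-- single O(n) pass summing per-position extra amplitude (faster: asymptotic).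


-- ===== PORT A =====
-- A-side helpers: posLen/negLen render A's inner `for i … if newlist[i]>0: k=i else: break`
-- scan (k+1 = posLen when the head is positive); mapFirst renders `for i in range(0,k+1): newlist[i] -= 1`.
def posLen : List Int → Nat
  | [] => 0
  | a :: t => if 0 < a then posLen t + 1 else 0

def negLen : List Int → Nat
  | [] => 0
  | a :: t => if a < 0 then negLen t + 1 else 0

def mapFirst (n : Nat) (f : Int → Int) : List Int → List Int
  | [] => []
  | a :: t =>
    match n with
    | 0 => a :: t
    | Nat.succ m => f a :: mapFirst m f t

def sumAbs (l : List Int) : Nat := (l.map Int.natAbs).sum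

theorem length_mapFirst (n : Nat) (f : Int → Int) (l : List Int) :
    (mapFirst n f l).length = l.length := by
  induction l generalizing n with
  | nil => simp [mapFirst]
  | cons a t ih =>
    cases n with
    | zero => rfl
    | succ m => simp [mapFirst, ih]

theorem sumAbs_dec_le (l : List Int) :
    sumAbs (mapFirst (posLen l) (fun x => x - 1) l) ≤ sumAbs l := by
  induction l with
  | nil => simp [mapFirst, sumAbs]
  | cons a t ih =>
    by_cases h : 0 < a
    · simp only [posLen, if_pos h, mapFirst, sumAbs, List.map_cons, List.sum_cons]
      have : (a - 1).natAbs ≤ a.natAbs := by omega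
      exact Nat.add_le_add this ih
    · simp [posLen, if_neg h, mapFirst]

theorem sumAbs_inc_le (l : List Int) :
    sumAbs (mapFirst (negLen l) (fun x => x + 1) l) ≤ sumAbs l := by
  induction l with
  | nil => simp [mapFirst, sumAbs]
  | cons a t ih =>
    by_cases h : a < 0
    · simp only [negLen, if_pos h, mapFirst, sumAbs, List.map_cons, List.sum_cons]
      have : (a + 1).natAbs ≤ a.natAbs := by omega
      exact Nat.add_le_add this ih
    · simp [negLen, if_neg h, mapFirst]

theorem sumAbs_dec_lt (a : Int) (t : List Int) (h : 0 < a) :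
    sumAbs (mapFirst (posLen (a :: t)) (fun x => x - 1) (a :: t)) < sumAbs (a :: t) := by
  simp only [posLen, if_pos h, mapFirst, sumAbs, List.map_cons, List.sum_cons]
  have h1 : (a - 1).natAbs < a.natAbs := by omega
  have h2 := sumAbs_dec_le t
  simp only [sumAbs] at h2
  omega

theorem sumAbs_inc_lt (a : Int) (t : List Int) (h : a < 0) :
    sumAbs (mapFirst (negLen (a :: t)) (fun x => x + 1) (a :: t)) < sumAbs (a :: t) := by
  simp only [negLen, if_pos h, mapFirst, sumAbs, List.map_cons, List.sum_cons]
  have h1 : (a + 1).natAbs < a.natAbs := by omega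
  have h2 := sumAbs_inc_le t
  simp only [sumAbs] at h2
  omega

-- A's `while newlist:` loop, step for step.
def Aloop (l : List Int) (d : Int) : Int :=
  match l with
  | [] => d
  | a :: t =>
    if a = 0 then Aloop t d
    else if 0 < a then Aloop (mapFirst (posLen (a :: t)) (fun x => x - 1) (a :: t)) (d + 1)
    else Aloop (mapFirst (negLen (a :: t)) (fun x => x + 1) (a :: t)) (d + 1)
termination_by l.length + sumAbs l
decreasing_by
  · simp [sumAbs]; omega
  · have := sumAbs_dec_lt a t (by assumption)
    have := length_mapFirst (posLen (a :: t)) (fun x => x - 1) (a :: t)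
    omega
  · have := sumAbs_inc_lt a t (by omega)
    have := length_mapFirst (negLen (a :: t)) (fun x => x + 1) (a :: t)
    omega

-- Python: assert equal lengths (Pre_); len==1 ⇒ abs(node1[0]-node2[0]); else subtract
-- node2 elementwise from a copy of node1 (zipWith, faithful since Pre_ gives equal lengths)
-- and run the while-loop; returns abs(d).
def distcalc (node1 : List Int) (node2 : List Int) : Int :=
  if node1.length = 1 then |node1.headD 0 - node2.headD 0|
  else |Aloop (List.zipWith (fun x y => x - y) node1 node2) 0|

-- ===== PORT B =====
def bStep (p a : Int) : Int :=
  max 0 (max a 0 - max p 0) + max 0 (max (-a) 0 - max (-p) 0)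

def distcalc_alt (node1 : List Int) (node2 : List Int) : Int :=
  ((node1.zip node2).foldl
    (fun (s : Int × Int) xy => (s.1 + bStep s.2 (xy.1 - xy.2), xy.1 - xy.2))
    (0, 0)).1

-- ===== PRECONDITION & SPEC =====
-- Pre_ excludes only inputs of unequal length, on which A's assert raises AssertionError.
def Pre_distcalc (node1 : List Int) (node2 : List Int) : Prop := node1.length = node2.length
instance (node1 : List Int) (node2 : List Int) : Decidable (Pre_distcalc node1 node2) := by unfold Pre_distcalc; infer_instance
def pvWitness_distcalc : List Int × List Int := ([1, -2, 0], [0, 3, -1])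

def Spec_distcalc (node1 : List Int) (node2 : List Int) (out : Int) : Prop := out = distcalc_alt node1 node2
instance (node1 : List Int) (node2 : List Int) (out : Int) : Decidable (Spec_distcalc node1 node2 out) := by unfold Spec_distcalc; infer_instance

-- ===== CLAIM (what is proved, stated in full; the proofs are below) =====
def Claim_equal_distcalc : Prop := ∀ (node1 : List Int) (node2 : List Int), Dom_distcalc node1 node2 → Pre_distcalc node1 node2 → Spec_distcalc node1 node2 (distcalc node1 node2)

-- ===== LEMMAS AND PROOFS =====

-- The closed form both programs compute: fold of bStep with the previous difference.
def Cform : Int → List Int → Int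
  | _, [] => 0
  | p, a :: t => bStep p a + Cform a t

theorem Cform_nonneg (p : Int) (l : List Int) : 0 ≤ Cform p l := by
  induction l generalizing p with
  | nil => simp [Cform]
  | cons a t ih =>
    have h1 : 0 ≤ bStep p a := by simp only [bStep]; omega
    have := ih a
    simp only [Cform]; omega

theorem foldl_Cform (l : List (Int × Int)) (d p : Int) :
    (l.foldl (fun (s : Int × Int) xy => (s.1 + bStep s.2 (xy.1 - xy.2), xy.1 - xy.2)) (d, p)).1
      = d + Cform p (l.map (fun xy => xy.1 - xy.2)) := by
  induction l generalizing d p with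
  | nil => simp [Cform]
  | cons a t ih => simp [List.foldl_cons, ih, Cform]; ring

theorem distcalc_alt_eq (node1 node2 : List Int) :
    distcalc_alt node1 node2 = Cform 0 (List.zipWith (fun x y => x - y) node1 node2) := by
  rw [distcalc_alt, foldl_Cform,
    show (fun xy : Int × Int => xy.1 - xy.2) = Function.uncurry (fun x y => x - y) from rfl,
    List.map_uncurry_zip_eq_zipWith, zero_add]

-- Decrementing the all-positive prefix commutes with Cform when the previous value is
-- also decremented (and stays nonnegative).
theorem Cform_dec_aux (P : List Int) :
    ∀ (R : List Int) (a : Int), 0 < a → (∀ x ∈ P, 0 < x) →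
    (R = [] ∨ ∃ b t, R = b :: t ∧ b ≤ 0) →
    Cform (a - 1) (P.map (fun x => x - 1) ++ R) = Cform a (P ++ R) := by
  induction P with
  | nil =>
    intro R a ha _ hR
    rcases hR with rfl | ⟨b, t, rfl, hb⟩
    · rfl
    · simp only [List.map_nil, List.nil_append, Cform]
      have : bStep (a - 1) b = bStep a b := by simp only [bStep]; omega
      rw [this]
  | cons x P' ih =>
    intro R a ha hP hR
    have hx : 0 < x := hP x (by simp)
    simp only [List.map_cons, List.cons_append, Cform]
    have h1 : bStep (a - 1) (x - 1) = bStep a x := by simp only [bStep]; omega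
    rw [h1, ih R x hx (fun y hy => hP y (by simp [hy])) hR]

theorem mapFirst_eq_take_drop (n : Nat) (f : Int → Int) (l : List Int) :
    mapFirst n f l = (l.take n).map f ++ l.drop n := by
  induction l generalizing n with
  | nil => simp [mapFirst]
  | cons a t ih =>
    cases n with
    | zero => simp [mapFirst]
    | succ m => simp [mapFirst, ih]

theorem take_posLen_pos (l : List Int) : ∀ x ∈ l.take (posLen l), 0 < x := by
  induction l with
  | nil => simp
  | cons a t ih =>
    by_cases h : 0 < a
    · simp only [posLen, if_pos h, List.take_succ_cons]
      intro x hx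
      rcases List.mem_cons.mp hx with rfl | hx
      · exact h
      · exact ih x hx
    · simp [posLen, if_neg h]

theorem drop_posLen (l : List Int) :
    l.drop (posLen l) = [] ∨ ∃ b t, l.drop (posLen l) = b :: t ∧ b ≤ 0 := by
  induction l with
  | nil => left; rfl
  | cons a t ih =>
    by_cases h : 0 < a
    · simpa [posLen, if_pos h] using ih
    · right; exact ⟨a, t, by simp [posLen, if_neg h], by omega⟩

theorem Cform_dec (a : Int) (t : List Int) (h : 0 < a) :
    Cform 0 (mapFirst (posLen (a :: t)) (fun x => x - 1) (a :: t)) = Cform 0 (a :: t) - 1 := by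
  have hsplit : a :: t = (a :: t).take (posLen (a :: t)) ++ (a :: t).drop (posLen (a :: t)) := by
    simp
  have hpos := take_posLen_pos (a :: t)
  have hdrop := drop_posLen (a :: t)
  have hhead : (a :: t).take (posLen (a :: t)) = a :: t.take (posLen t) := by
    simp [posLen, if_pos h]
  rw [hhead] at hpos
  rw [mapFirst_eq_take_drop, hhead]
  conv_rhs => rw [hsplit, hhead]
  simp only [List.map_cons, List.cons_append, Cform]
  have h1 : bStep 0 (a - 1) = bStep 0 a - 1 := by simp only [bStep]; omega
  have h2 : Cform (a - 1) ((t.take (posLen t)).map (fun x => x - 1) ++ (a :: t).drop (posLen (a :: t)))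
      = Cform a (t.take (posLen t) ++ (a :: t).drop (posLen (a :: t))) :=
    Cform_dec_aux _ _ a h (fun x hx => hpos x (by simp [hx])) hdrop
  rw [h1, h2]; ring

-- Negation symmetry: bStep swaps its two summands under sign flip.
theorem Cform_neg (l : List Int) : ∀ p : Int, Cform (-p) (l.map (fun x => -x)) = Cform p l := by
  induction l with
  | nil => intro p; rfl
  | cons a t ih =>
    intro p
    simp only [List.map_cons, Cform]
    have h1 : bStep (-p) (-a) = bStep p a := by simp only [bStep]; omega
    rw [h1, ih a]

theorem negLen_eq_posLen_neg (l : List Int) : negLen l = posLen (l.map (fun x => -x)) := by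
  induction l with
  | nil => rfl
  | cons a t ih =>
    by_cases h : a < 0
    · simp [negLen, posLen, if_pos h, ih]
    · simp [negLen, posLen, if_neg h]

theorem map_neg_mapFirst (n : Nat) (l : List Int) :
    (mapFirst n (fun x => x + 1) l).map (fun x => -x)
      = mapFirst n (fun x => x - 1) (l.map (fun x => -x)) := by
  induction l generalizing n with
  | nil => simp [mapFirst]
  | cons a t ih =>
    cases n with
    | zero => simp [mapFirst]
    | succ m => simp [mapFirst, ih]; ring

theorem Cform_inc (a : Int) (t : List Int) (h : a < 0) :
    Cform 0 (mapFirst (negLen (a :: t)) (fun x => x + 1) (a :: t)) = Cform 0 (a :: t) - 1 := by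
  have hA := Cform_neg (mapFirst (negLen (a :: t)) (fun x => x + 1) (a :: t)) 0
  rw [neg_zero] at hA
  have hB := Cform_neg (a :: t) 0
  rw [neg_zero] at hB
  have hm : (a :: t).map (fun x => -x) = (-a) :: t.map (fun x => -x) := by simp
  rw [← hA, map_neg_mapFirst, negLen_eq_posLen_neg, hm, Cform_dec (-a) _ (by omega), ← hm, hB]

theorem Aloop_eq (l : List Int) (d : Int) : Aloop l d = d + Cform 0 l := by
  induction l, d using Aloop.induct with
  | case1 d => simp [Aloop, Cform]
  | case2 d t ih =>
    have hb : bStep 0 0 = 0 := by decide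
    simp [Aloop, Cform, hb, ih]
  | case3 d a t h0 hpos ih =>
    rw [Aloop]
    simp only [if_neg h0, if_pos hpos]
    rw [ih, Cform_dec a t hpos]; ring
  | case4 d a t h0 hpos ih =>
    rw [Aloop]
    simp only [if_neg h0, if_neg hpos]
    rw [ih, Cform_inc a t (by omega)]; ring

-- ===== VERDICT (by name: the statement is the Claim_ definition above) =====
theorem distcalc_spec : Claim_equal_distcalc := by
  intro node1 node2 _ hpre
  unfold Spec_distcalc
  rw [distcalc_alt_eq, distcalc]
  by_cases h1 : node1.length = 1
  · rw [if_pos h1]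
    match node1, node2, h1, hpre with
    | [x], [y], _, _ =>
      simp only [List.headD, List.zipWith, Cform, bStep]
      rw [abs_eq_max_neg]
      omega
  · rw [if_neg h1, Aloop_eq, zero_add,
      abs_of_nonneg (Cform_nonneg 0 (List.zipWith (fun x y => x - y) node1 node2))]
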